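-- pv_equiv track=rewrite | github.com/garthtrickett/super-shaper-9000 | apply_changes.py | replace_part_with_missing_leading_whitespace
-- ===== SOURCE A (Python) =====
-- def match_but_for_leading_whitespace(whole_lines, part_lines):
--     num = len(whole_lines)
--     if not all(whole_lines[i].lstrip() == part_lines[i].lstrip() for i in range(num)):
--         return None
--
--     add = set(
--         whole_lines[i][: len(whole_lines[i]) - len(part_lines[i])]
--         for i in range(num)
--         if whole_lines[i].strip()
--     )
--
--     if len(add) != 1:
--         return None
--     return add.pop()
--
-- def replace_part_with_missing_leading_whitespace(whole_lines, part_lines, replace_lines):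
--     """Strategy 2: Handles uniformly indented/outdented blocks."""
--     if not part_lines:
--         return None
--
--     leading = [len(p) - len(p.lstrip()) for p in part_lines if p.strip()] + [
--         len(p) - len(p.lstrip()) for p in replace_lines if p.strip()
--     ]
--
--     if leading and min(leading):
--         num_leading = min(leading)
--         part_lines = [p[num_leading:] if p.strip() else p for p in part_lines]
--         replace_lines = [p[num_leading:] if p.strip() else p for p in replace_lines]
--
--     num_part_lines = len(part_lines)
--     for i in range(len(whole_lines) - num_part_lines + 1):
--         add_leading = match_but_for_leading_whitespace(
--             whole_lines[i : i + num_part_lines], part_lines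
--         )
--         if add_leading is None:
--             continue
--
--         adjusted_replace = [add_leading + rline if rline.strip() else rline for rline in replace_lines]
--         res = whole_lines[:i] + adjusted_replace + whole_lines[i + num_part_lines :]
--         return "".join(res)
--     return None
-- ===== SOURCE B (Python) =====
-- def replace_part_with_missing_leading_whitespace(whole_lines, part_lines, replace_lines):
--     """Strategy 2 via an occurrence index: lstrip every line once, bucket the
--     whole-file indices by their lstripped text in a dict, and probe only the
--     positions where the first (dedented, lstripped) part line actually occurs,
--     instead of scanning every window."""
--     if not part_lines:
--         return None
--
--     indents = [len(p) - len(p.lstrip()) for p in part_lines + replace_lines if p.strip()]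
--     if indents and min(indents):
--         m = min(indents)
--         part_lines = [p[m:] if p.strip() else p for p in part_lines]
--         replace_lines = [p[m:] if p.strip() else p for p in replace_lines]
--
--     n = len(part_lines)
--     total = len(whole_lines)
--     sw = [w.lstrip() for w in whole_lines]
--     sp = [p.lstrip() for p in part_lines]
--
--     occ = {}
--     for idx, s in enumerate(sw):
--         occ.setdefault(s, []).append(idx)
--
--     for i in occ.get(sp[0], []):
--         if i + n > total:
--             break
--         if sw[i:i + n] != sp:
--             continue
--         prefixes = {
--             whole_lines[i + j][: len(whole_lines[i + j]) - len(part_lines[j])]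
--             for j in range(n)
--             if whole_lines[i + j].strip()
--         }
--         if len(prefixes) != 1:
--             continue
--         add_leading = prefixes.pop()
--         adjusted = [add_leading + r if r.strip() else r for r in replace_lines]
--         return "".join(whole_lines[:i] + adjusted + whole_lines[i + n:])
--     return None
-- ===== Notes on version B (the rewrite author's own statement) =====
-- stated objective: alternative
-- what changed: A slides a window over every position, and for each window a helper lstrips every window line again, runs an lstrip-equality pass and then builds a set of indent prefixes; B lstrips every line exactly once up front, buckets whole-file indices by lstripped text in a dict built in one pass, and only probes the bucket of the first part line, comparing precomputed lstripped slices and checking prefix uniformity at those candidates.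
import Mathlib
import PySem

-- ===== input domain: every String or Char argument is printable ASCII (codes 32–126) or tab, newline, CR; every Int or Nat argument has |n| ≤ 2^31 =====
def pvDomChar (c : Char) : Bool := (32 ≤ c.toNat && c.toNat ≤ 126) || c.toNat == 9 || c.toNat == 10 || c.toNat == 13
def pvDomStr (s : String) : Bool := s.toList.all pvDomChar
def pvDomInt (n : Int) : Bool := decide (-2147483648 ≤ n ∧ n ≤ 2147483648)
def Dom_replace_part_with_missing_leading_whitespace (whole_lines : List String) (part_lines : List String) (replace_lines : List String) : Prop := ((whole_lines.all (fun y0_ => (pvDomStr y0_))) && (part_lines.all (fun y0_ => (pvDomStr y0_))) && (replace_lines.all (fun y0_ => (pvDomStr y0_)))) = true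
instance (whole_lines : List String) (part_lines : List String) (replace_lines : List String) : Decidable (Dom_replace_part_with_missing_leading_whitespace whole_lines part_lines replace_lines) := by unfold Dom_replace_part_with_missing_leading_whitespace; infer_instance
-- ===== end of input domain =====

-- B replaces A's scan of every window (which lstrips each window line afresh) by: lstrip every
-- line once, bucket whole-file indices by lstripped text in a dict built in one pass, and test
-- only the bucket of the first part line; objective: alternative (no speed claim).

-- ===== PORT A =====
-- A's helper. Python iterates i over range(len(whole_lines)) indexing whole_lines[i] and
-- part_lines[i]; at both call sites the two lists have equal length, so the traversal is
-- ported as the same pairwise walk over the zip (exact there).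
def match_but_for_leading_whitespace (whole_lines part_lines : List String) : Option String :=
  let pairs := whole_lines.zip part_lines
  if pairs.all (fun wp => PySem.Str.lstrip wp.1 == PySem.Str.lstrip wp.2) then
    let add : PySem.Set String := PySem.Set.ofList
      ((pairs.filter (fun wp => decide (PySem.Str.strip wp.1 ≠ ""))).map
        (fun wp => PySem.Str.slice wp.1 none (some (PySem.Str.len wp.1 - PySem.Str.len wp.2))))
    match add with
    | [q] => some q
    | _ => none
  else none

def replace_part_with_missing_leading_whitespace (whole_lines : List String) (part_lines : List String) (replace_lines : List String) : Option String :=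
  if part_lines.isEmpty then none else
  let leading : List Int :=
    (part_lines.filter (fun p => decide (PySem.Str.strip p ≠ ""))).map
      (fun p => PySem.Str.len p - PySem.Str.len (PySem.Str.lstrip p)) ++
    (replace_lines.filter (fun p => decide (PySem.Str.strip p ≠ ""))).map
      (fun p => PySem.Str.len p - PySem.Str.len (PySem.Str.lstrip p))
  -- 'if leading and min(leading):' — leading nonempty iff min? is some; truthiness of the min
  let st :=
    match PySem.List.min? leading (fun x => x) with
    | some m =>
      if m ≠ 0 then
        (part_lines.map (fun p => if PySem.Str.strip p ≠ "" then PySem.Str.slice p (some m) none else p),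
         replace_lines.map (fun p => if PySem.Str.strip p ≠ "" then PySem.Str.slice p (some m) none else p))
      else (part_lines, replace_lines)
    | none => (part_lines, replace_lines)
  let part := st.1
  let repl := st.2
  let n : Int := PySem.List.len part
  (PySem.List.pyRange 0 (PySem.List.len whole_lines - n + 1) 1).findSome? (fun i =>
    (match_but_for_leading_whitespace (PySem.List.slice whole_lines (some i) (some (i + n))) part).map
      (fun add_leading =>
        PySem.Str.join "" (PySem.List.slice whole_lines none (some i) ++
          repl.map (fun r => if PySem.Str.strip r ≠ "" then add_leading ++ r else r) ++
          PySem.List.slice whole_lines (some (i + n)) none)))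

-- ===== PORT B =====
-- Source B's loop body at one candidate index i (a Python int).  whole_lines[i+j] / part_lines[j]
-- are always in range at this call site, so the indexings are ported with pyGetD (exact there).
def pvVerifyB (whole part repl sw sp : List String) (n : Int) (i : Int) : Option String :=
  if PySem.List.slice sw (some i) (some (i + n)) = sp then
    let prefixes : PySem.Set String := PySem.Set.ofList
      (((PySem.List.pyRange 0 n 1).filter
          (fun j => decide (PySem.Str.strip (PySem.List.pyGetD whole (i + j) "") ≠ ""))).map
        (fun j =>
          PySem.Str.slice (PySem.List.pyGetD whole (i + j) "") none
            (some (PySem.Str.len (PySem.List.pyGetD whole (i + j) "") -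
                   PySem.Str.len (PySem.List.pyGetD part j "")))))
    match prefixes with
    | [q] => some (PySem.Str.join "" (PySem.List.slice whole none (some i) ++
        repl.map (fun r => if PySem.Str.strip r ≠ "" then q ++ r else r) ++
        PySem.List.slice whole (some (i + n)) none))
    | _ => none
  else none

-- Source B's 'for i in occ.get(sp[0], []):' with its break (i + n > total) and early return
def pvGoB (whole part repl sw sp : List String) (total n : Int) : List Int → Option String
  | [] => none
  | i :: rest =>
    if total < i + n then none
    else match pvVerifyB whole part repl sw sp n i with
      | some r => some r
      | none => pvGoB whole part repl sw sp total n rest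

def replace_part_with_missing_leading_whitespace_alt (whole_lines : List String) (part_lines : List String) (replace_lines : List String) : Option String :=
  if part_lines.isEmpty then none else
  let indents : List Int :=
    ((part_lines ++ replace_lines).filter (fun p => decide (PySem.Str.strip p ≠ ""))).map
      (fun p => PySem.Str.len p - PySem.Str.len (PySem.Str.lstrip p))
  let st :=
    match PySem.List.min? indents (fun x => x) with
    | some m =>
      if m ≠ 0 then
        (part_lines.map (fun p => if PySem.Str.strip p ≠ "" then PySem.Str.slice p (some m) none else p),
         replace_lines.map (fun p => if PySem.Str.strip p ≠ "" then PySem.Str.slice p (some m) none else p))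
      else (part_lines, replace_lines)
    | none => (part_lines, replace_lines)
  let part := st.1
  let repl := st.2
  let n : Int := PySem.List.len part
  let total : Int := PySem.List.len whole_lines
  let sw := whole_lines.map PySem.Str.lstrip
  let sp := part.map PySem.Str.lstrip
  -- occ.setdefault(s, []).append(idx)  ==  modify s [] (· ++ [idx])
  let occ : PySem.Dict String (List Int) :=
    (PySem.List.enumerate sw).foldl
      (fun d p => d.modify p.2 [] (fun l => l ++ [p.1])) PySem.Dict.empty
  -- sp[0]: part is nonempty here, so headD's default is never taken
  pvGoB whole_lines part repl sw sp total n (occ.getD (sp.headD "") [])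

-- ===== PRECONDITION & SPEC =====
def Spec_replace_part_with_missing_leading_whitespace (whole_lines : List String) (part_lines : List String) (replace_lines : List String) (out : Option String) : Prop := out = replace_part_with_missing_leading_whitespace_alt whole_lines part_lines replace_lines
instance (whole_lines : List String) (part_lines : List String) (replace_lines : List String) (out : Option String) : Decidable (Spec_replace_part_with_missing_leading_whitespace whole_lines part_lines replace_lines out) := by unfold Spec_replace_part_with_missing_leading_whitespace; infer_instance

-- ===== CLAIM (what is proved, stated in full; the proofs are below) =====
def Claim_equal_replace_part_with_missing_leading_whitespace : Prop := ∀ (whole_lines : List String) (part_lines : List String) (replace_lines : List String), Dom_replace_part_with_missing_leading_whitespace whole_lines part_lines replace_lines → Spec_replace_part_with_missing_leading_whitespace whole_lines part_lines replace_lines (replace_part_with_missing_leading_whitespace whole_lines part_lines replace_lines)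

-- ===== LEMMAS AND PROOFS =====

theorem pv_occ_getD (sw : List String) (c : String) :
    ((PySem.List.enumerate sw).foldl
        (fun d p => d.modify p.2 [] (fun l => l ++ [p.1])) PySem.Dict.empty).getD c []
      = ((PySem.List.enumerate sw).filter (fun p => p.2 == c)).map (·.1) := by
  have h1 : ((PySem.List.enumerate sw).map (fun p => (p.2, p.1))).foldl
      (fun d (q : String × Int) => d.modify q.1 [] (fun l => l ++ [q.2])) PySem.Dict.empty
      = (PySem.List.enumerate sw).foldl
        (fun d p => d.modify p.2 [] (fun l => l ++ [p.1])) PySem.Dict.empty := List.foldl_map ..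
  rw [← h1, PySem.Dict.getD_foldl_modify_append, List.filter_map, List.map_map]
  simp [Function.comp_def, PySem.Dict.getD_empty]

theorem pv_mem_enumerate (xs : List String) (s : Int) (p : Int × String)
    (hp : p ∈ PySem.List.enumerate xs s) :
    ∃ k : Nat, ∃ h : k < xs.length, p.1 = s + k ∧ p.2 = xs[k] := by
  induction xs generalizing s with
  | nil => simp [PySem.List.enumerate_nil] at hp
  | cons x xs ih =>
    rw [PySem.List.enumerate_cons] at hp
    rcases List.mem_cons.mp hp with rfl | hp'
    · exact ⟨0, by simp, by simp⟩
    · rcases ih (s+1) hp' with ⟨k, hk, h1, h2⟩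
      exact ⟨k+1, by simpa using hk, by push_cast at h1 ⊢; omega, by simpa using h2⟩

theorem pvFindSome_congr {α β : Type} (l : List α) (f g : α → Option β)
    (h : ∀ x ∈ l, f x = g x) : l.findSome? f = l.findSome? g := by
  induction l with
  | nil => rfl
  | cons a l ih =>
    rw [List.findSome?_cons, List.findSome?_cons, h a (by simp)]
    cases g a with
    | none => exact ih (fun x hx => h x (by simp [hx]))
    | some b => rfl

theorem pvFindSome_filter (l : List (Int × String)) (g : Int → Option String) (c : String)
    (h : ∀ p ∈ l, p.2 ≠ c → g p.1 = none) :
    ((l.filter (fun p => p.2 == c)).map (·.1)).findSome? g = (l.map (·.1)).findSome? g := by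
  induction l with
  | nil => rfl
  | cons p l ih =>
    by_cases hc : p.2 = c
    · simp only [List.filter_cons, hc, beq_self_eq_true, if_pos, List.map_cons,
        List.findSome?_cons]
      cases g p.1 with
      | none => exact ih (fun q hq => h q (by simp [hq]))
      | some r => rfl
    · have hb : (p.2 == c) = false := by simpa using hc
      simp only [List.filter_cons, hb, Bool.false_eq_true, if_false, List.map_cons,
        List.findSome?_cons, h p (by simp) hc]
      exact ih (fun q hq => h q (by simp [hq]))

theorem pvGo_eq (whole part repl sw sp : List String) (total n : Int) (L : List Int)
    (hL : L.Pairwise (· < ·)) :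
    pvGoB whole part repl sw sp total n L
      = L.findSome? (fun i => if total < i + n then none
          else pvVerifyB whole part repl sw sp n i) := by
  induction L with
  | nil => rfl
  | cons i rest ih =>
    rw [List.pairwise_cons] at hL
    rw [List.findSome?_cons, pvGoB]
    by_cases hb : total < i + n
    · rw [if_pos hb, if_pos hb]
      exact (List.findSome?_eq_none_iff.mpr (fun j hj => by
        have := hL.1 j hj
        rw [if_pos (by omega)])).symm
    · rw [if_neg hb, if_neg hb]
      cases pvVerifyB whole part repl sw sp n i with
      | some r => rfl
      | none => exact ih hL.2

theorem pvZipAll (xs ys : List String) (h : xs.length = ys.length) :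
    ((xs.zip ys).all (fun wp => PySem.Str.lstrip wp.1 == PySem.Str.lstrip wp.2)) = true
      ↔ xs.map PySem.Str.lstrip = ys.map PySem.Str.lstrip := by
  induction xs generalizing ys with
  | nil => cases ys with
    | nil => simp
    | cons y ys => simp at h
  | cons x xs ih =>
    cases ys with
    | nil => simp at h
    | cons y ys =>
      simp only [List.zip_cons_cons, List.all_cons, List.map_cons, Bool.and_eq_true, beq_iff_eq,
        List.cons.injEq]
      exact and_congr Iff.rfl (ih ys (by simpa using h))

-- A's per-window prefix list, named so it can be related to B's index comprehension
def pvPrefs (zs : List (String × String)) : List String :=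
  (zs.filter (fun wp => decide (PySem.Str.strip wp.1 ≠ ""))).map
    (fun wp => PySem.Str.slice wp.1 none (some (PySem.Str.len wp.1 - PySem.Str.len wp.2)))

theorem pvPrefs_idx (whole : List String) (ys : List String) (k : Nat)
    (h : k + ys.length ≤ whole.length) :
    pvPrefs (((whole.drop k).take ys.length).zip ys)
      = ((List.range ys.length).filter
            (fun j => decide (PySem.Str.strip (whole.getD (k + j) "") ≠ ""))).map
          (fun j => PySem.Str.slice (whole.getD (k + j) "") none
            (some (PySem.Str.len (whole.getD (k + j) "") - PySem.Str.len (ys.getD j "")))) := by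
  induction ys generalizing k with
  | nil => simp [pvPrefs]
  | cons y ys ih =>
    have hk : k < whole.length := by simp [List.length_cons] at h; omega
    have hd : whole.drop k = whole[k] :: whole.drop (k + 1) := List.drop_eq_getElem_cons hk
    have hg : whole.getD (k + 0) "" = whole[k] := by
      simpa using List.getD_eq_getElem whole "" (by omega : k + 0 < whole.length)
    have ih' := ih (k + 1) (by simp [List.length_cons] at h; omega)
    rw [hd]
    simp only [List.length_cons, List.take_succ_cons, List.zip_cons_cons,
      List.range_succ_eq_map, List.filter_cons, List.filter_map, pvPrefs] at ih' ⊢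
    simp only [Function.comp_def, Nat.succ_eq_add_one, hg]
    simp only [← Nat.add_assoc]
    simp only [Nat.add_right_comm _ 1] at ih'
    have hg' : whole.getD k "" = whole[k] := List.getD_eq_getElem _ _ hk
    by_cases hs : decide (PySem.Str.strip whole[k] ≠ "") = true
    · rw [if_pos hs, if_pos hs]
      simp only [List.map_cons, List.map_map, Function.comp_def, Nat.succ_eq_add_one,
        List.getD_cons_succ, List.getD_cons_zero, Nat.add_zero, hg', ← Nat.add_assoc]
      rw [ih']
    · rw [if_neg hs, if_neg hs]
      simp only [List.map_map, Function.comp_def, Nat.succ_eq_add_one,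
        List.getD_cons_succ, ← Nat.add_assoc]
      exact ih'

theorem pvBody_eq (whole part repl : List String) (k : Nat)
    (h : k + part.length ≤ whole.length) :
    (match_but_for_leading_whitespace
        (PySem.List.slice whole (some (k : Int)) (some ((k : Int) + (part.length : Int)))) part).map
      (fun add_leading =>
        PySem.Str.join "" (PySem.List.slice whole none (some (k : Int)) ++
          repl.map (fun r => if PySem.Str.strip r ≠ "" then add_leading ++ r else r) ++
          PySem.List.slice whole (some ((k : Int) + (part.length : Int))) none))
      = pvVerifyB whole part repl (whole.map PySem.Str.lstrip) (part.map PySem.Str.lstrip)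
          (part.length : Int) (k : Int) := by
  have hsl : PySem.List.slice whole (some (k : Int)) (some ((k : Int) + (part.length : Int)))
      = (whole.drop k).take part.length := PySem.List.slice_natCast_add whole k part.length
  have hsw : PySem.List.slice (whole.map PySem.Str.lstrip) (some (k : Int))
        (some ((k : Int) + (part.length : Int)))
      = ((whole.drop k).take part.length).map PySem.Str.lstrip := by
    rw [PySem.List.slice_natCast_add]
    simp [List.map_take, List.map_drop]
  have hlen : ((whole.drop k).take part.length).length = part.length := by
    simp; omega
  rw [hsl]
  simp only [match_but_for_leading_whitespace, pvVerifyB]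
  simp only [hsw]
  by_cases hall : (((whole.drop k).take part.length).zip part).all
      (fun wp => PySem.Str.lstrip wp.1 == PySem.Str.lstrip wp.2) = true
  · have heq := (pvZipAll _ _ hlen).mp hall
    simp only [hall, if_true, heq]
    have hpr : (((((whole.drop k).take part.length).zip part).filter
          (fun wp => decide (PySem.Str.strip wp.1 ≠ ""))).map
            (fun wp => PySem.Str.slice wp.1 none (some (PySem.Str.len wp.1 - PySem.Str.len wp.2))))
        = (((PySem.List.pyRange 0 (part.length : Int) 1).filter
            (fun j => decide (PySem.Str.strip (PySem.List.pyGetD whole ((k : Int) + j) "") ≠ ""))).map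
          (fun j =>
            PySem.Str.slice (PySem.List.pyGetD whole ((k : Int) + j) "") none
              (some (PySem.Str.len (PySem.List.pyGetD whole ((k : Int) + j) "") -
                     PySem.Str.len (PySem.List.pyGetD part j ""))))) := by
      have h1 := pvPrefs_idx whole part k h
      rw [pvPrefs] at h1
      rw [h1, PySem.List.pyRange_one]
      simp only [Int.sub_zero, Int.toNat_natCast, List.filter_map, List.map_map,
        Function.comp_def, zero_add, ← Nat.cast_add, PySem.List.pyGetD_natCast]
    rw [hpr]
    cases PySem.Set.ofList (((PySem.List.pyRange 0 (part.length : Int) 1).filter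
            (fun j => decide (PySem.Str.strip (PySem.List.pyGetD whole ((k : Int) + j) "") ≠ ""))).map
          (fun j =>
            PySem.Str.slice (PySem.List.pyGetD whole ((k : Int) + j) "") none
              (some (PySem.Str.len (PySem.List.pyGetD whole ((k : Int) + j) "") -
                     PySem.Str.len (PySem.List.pyGetD part j ""))))) with
    | nil => rfl
    | cons a t => cases t with
      | nil => rfl
      | cons b t2 => rfl
  · have hne : ¬ ((whole.drop k).take part.length).map PySem.Str.lstrip
        = part.map PySem.Str.lstrip := fun hc => hall ((pvZipAll _ _ hlen).mpr hc)
    simp only [hall, if_false, Bool.false_eq_true, hne, Option.map_none]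

theorem pvVerify_none (whole part repl sw sp : List String) (k : Nat)
    (hk : k < sw.length) (hsp : sp = part.map PySem.Str.lstrip) (hne : part ≠ [])
    (hx : sw[k] ≠ sp.headD "") :
    pvVerifyB whole part repl sw sp (part.length : Int) (k : Int) = none := by
  have hsl : PySem.List.slice sw (some (k : Int)) (some ((k : Int) + (part.length : Int)))
      = (sw.drop k).take part.length := PySem.List.slice_natCast_add sw k part.length
  have hcond : ¬ PySem.List.slice sw (some (k : Int)) (some ((k : Int) + (part.length : Int))) = sp := by
    rw [hsl]
    obtain ⟨q, qs, rfl⟩ := List.exists_cons_of_ne_nil hne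
    intro hc
    rw [List.drop_eq_getElem_cons hk] at hc
    simp only [hsp, List.map_cons, List.length_cons, List.take_succ_cons, List.cons.injEq] at hc
    exact hx (by simp [hsp, hc.1])
  simp only [pvVerifyB, hcond, if_false]

theorem pvMain (whole part repl : List String) (hne : part ≠ []) :
    (PySem.List.pyRange 0 (PySem.List.len whole - PySem.List.len part + 1) 1).findSome? (fun i =>
      (match_but_for_leading_whitespace (PySem.List.slice whole (some i) (some (i + PySem.List.len part))) part).map
        (fun add_leading =>
          PySem.Str.join "" (PySem.List.slice whole none (some i) ++
            repl.map (fun r => if PySem.Str.strip r ≠ "" then add_leading ++ r else r) ++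
            PySem.List.slice whole (some (i + PySem.List.len part)) none)))
    = pvGoB whole part repl (whole.map PySem.Str.lstrip) (part.map PySem.Str.lstrip)
        (PySem.List.len whole) (PySem.List.len part)
        ((((PySem.List.enumerate (whole.map PySem.Str.lstrip)).foldl
            (fun d p => d.modify p.2 [] (fun l => l ++ [p.1])) PySem.Dict.empty)).getD
          ((part.map PySem.Str.lstrip).headD "") []) := by
  simp only [PySem.List.len_eq]
  set sw := whole.map PySem.Str.lstrip with hswdef
  set sp := part.map PySem.Str.lstrip with hspdef
  have hswlen : sw.length = whole.length := by simp [hswdef]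
  have hn1 : 1 ≤ part.length := by
    cases part with | nil => exact absurd rfl hne | cons a t => simp
  rw [pv_occ_getD]
  -- the candidate list is strictly increasing
  have hpw : (((PySem.List.enumerate sw).filter (fun p => p.2 == sp.headD "")).map (·.1)).Pairwise (· < ·) := by
    have h1 : (((PySem.List.enumerate sw).filter (fun p => p.2 == sp.headD "")).map (·.1)).Sublist
        ((PySem.List.enumerate sw).map (·.1)) := List.Sublist.map _ List.filter_sublist
    have h2 : ((PySem.List.enumerate sw).map (·.1)).Pairwise (· < ·) := by
      rw [PySem.List.map_fst_enumerate]
      exact PySem.List.pairwise_lt_pyRange_one _ _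
    exact h2.sublist h1
  rw [pvGo_eq _ _ _ _ _ _ _ _ hpw]
  rw [pvFindSome_filter _ _ _ ?hnc]
  case hnc =>
    intro p hp hpx
    obtain ⟨k, hk, hp1, hp2⟩ := pv_mem_enumerate _ _ _ hp
    rw [hp1]
    simp only [zero_add]
    by_cases hb : (whole.length : Int) < (k : Int) + (part.length : Int)
    · rw [if_pos hb]
    · rw [if_neg hb]
      exact pvVerify_none whole part repl sw sp k hk hspdef hne (by rw [← hp2]; exact hpx)
  rw [PySem.List.map_fst_enumerate]
  simp only [zero_add, hswlen]
  by_cases hc : (whole.length : Int) - (part.length : Int) + 1 ≤ 0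
  · rw [PySem.List.pyRange_one_eq_nil hc]
    rw [List.findSome?_nil]
    refine (List.findSome?_eq_none_iff.mpr ?_).symm
    intro i hi
    have hmem := (PySem.List.mem_pyRange_one).mp hi
    rw [if_pos (by omega)]
  · push Not at hc
    set m : Int := (whole.length : Int) - (part.length : Int) + 1 with hmdef
    have hm0 : 0 ≤ m := by omega
    have hmtot : m ≤ (whole.length : Int) := by omega
    rw [PySem.List.pyRange_one_append 0 m (whole.length : Int) hm0 hmtot,
      List.findSome?_append]
    have h2none : (PySem.List.pyRange m (whole.length : Int) 1).findSome?
        (fun i => if (whole.length : Int) < i + (part.length : Int) then none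
          else pvVerifyB whole part repl sw sp (part.length : Int) i) = none := by
      refine List.findSome?_eq_none_iff.mpr ?_
      intro i hi
      have hmem := (PySem.List.mem_pyRange_one).mp hi
      rw [if_pos (by omega)]
    rw [h2none, Option.or_none]
    refine pvFindSome_congr _ _ _ ?_
    intro i hi
    have hmem := (PySem.List.mem_pyRange_one).mp hi
    have hik : i = ((i.toNat : Nat) : Int) := (Int.toNat_of_nonneg hmem.1).symm
    have hkb : i.toNat + part.length ≤ whole.length := by omega
    rw [if_neg (by omega)]
    rw [hik]
    exact pvBody_eq whole part repl i.toNat hkb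

-- ===== VERDICT (by name: the statement is the Claim_ definition above) =====
theorem replace_part_with_missing_leading_whitespace_spec : Claim_equal_replace_part_with_missing_leading_whitespace := by
  intro whole part repl _
  unfold Spec_replace_part_with_missing_leading_whitespace
  unfold replace_part_with_missing_leading_whitespace replace_part_with_missing_leading_whitespace_alt
  by_cases hp : part.isEmpty
  · simp [hp]
  · simp only [hp, Bool.false_eq_true, if_false]
    simp only [List.filter_append, List.map_append]
    have hpne : part ≠ [] := by simpa [List.isEmpty_iff] using hp
    cases hmin : PySem.List.min? ((part.filter (fun p => decide (PySem.Str.strip p ≠ ""))).map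
        (fun p => PySem.Str.len p - PySem.Str.len (PySem.Str.lstrip p)) ++
      (repl.filter (fun p => decide (PySem.Str.strip p ≠ ""))).map
        (fun p => PySem.Str.len p - PySem.Str.len (PySem.Str.lstrip p))) (fun x => x) with
    | none => exact pvMain whole part repl hpne
    | some m =>
      by_cases hm : m ≠ 0
      · simp only [if_pos hm]
        refine pvMain whole _ _ ?_
        simpa using hpne
      · simp only [if_neg hm]
        exact pvMain whole part repl hpne
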